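-- pv_equiv track=rewrite | github.com/Lv296TAQC/python_tasks | tasks/Kseniia_task4_331b.py | func
-- ===== SOURCE A (Python) =====
-- def func(n):
--     answer = []
--     for i in range(n):
--         for j in range(n):
--             for k in range(n):
--                 if i * i + j * j + k * k == n and i >= j and j >= k:
--                     answer.append((i, j, k))
--     return answer
-- ===== SOURCE B (Python) =====
-- def isqrt_bs(m):
--     """Floor square root of m >= 0 by binary search (invariant lo*lo <= m < hi*hi)."""
--     lo, hi = 0, m + 1
--     while hi - lo > 1:
--         mid = (lo + hi) // 2
--         if mid * mid <= m:
--             lo = mid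
--         else:
--             hi = mid
--     return lo
--
--
-- def func(n):
--     answer = []
--     i = 0
--     while i * i <= n:
--         for j in range(i + 1):
--             rem = n - i * i - j * j
--             if rem >= 0:
--                 k = isqrt_bs(rem)
--                 if k <= j and k * k == rem:
--                     answer.append((i, j, k))
--         i += 1
--     return answer
-- ===== Notes on version B (the rewrite author's own statement) =====
-- stated objective: faster
-- what changed: Replaces the O(n^3) triple scan over range(n) with a loop over i while i*i<=n and j<=i, computing the unique candidate k by binary-search integer square root and verifying it.
-- intended difference: For n=0 and n=1 A's range(n) bound excludes the valid triples (0,0,0) resp. (1,0,0), so A returns [] while B returns the triple; B's value is the intended answer since i^2+j^2+k^2=n holds there. — e.g. on func(0): A returns [], B returns [(0, 0, 0)]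
import Mathlib
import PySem

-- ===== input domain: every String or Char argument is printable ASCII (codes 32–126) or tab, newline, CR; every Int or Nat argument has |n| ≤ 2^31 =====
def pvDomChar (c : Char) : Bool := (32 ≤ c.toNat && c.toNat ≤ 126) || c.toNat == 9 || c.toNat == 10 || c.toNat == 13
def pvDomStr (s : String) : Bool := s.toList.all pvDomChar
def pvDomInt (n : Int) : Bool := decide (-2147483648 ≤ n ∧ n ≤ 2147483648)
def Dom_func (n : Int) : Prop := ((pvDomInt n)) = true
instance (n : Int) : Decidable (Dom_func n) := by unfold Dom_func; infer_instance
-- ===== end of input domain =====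

-- B replaces A's triple scan over range(n) with i, j bounded by the square root and a
-- binary-search integer square root producing the unique candidate k (objective: faster).

-- ===== PORT A =====
def func (n : Int) : List (Int × Int × Int) :=
  (PySem.List.pyRange 0 n 1).foldl (fun a1 i =>
    (PySem.List.pyRange 0 n 1).foldl (fun a2 j =>
      (PySem.List.pyRange 0 n 1).foldl (fun a3 k =>
        if i * i + j * j + k * k = n ∧ i ≥ j ∧ j ≥ k then a3 ++ [(i, j, k)] else a3) a2) a1) []

-- ===== PORT B =====
-- Source B's isqrt_bs while-loop (state lo, hi); fuel = hi - lo bounds the iterations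
-- (the bracket width shrinks every step), making the recursion structural
def isqrtGo : Nat → Int → Int → Int → Int
  | 0, _, lo, _ => lo
  | fuel + 1, m, lo, hi =>
    if hi - lo > 1 then
      let mid := PySem.Int.floordiv (lo + hi) 2
      if mid * mid ≤ m then isqrtGo fuel m mid hi else isqrtGo fuel m lo mid
    else lo

-- Source B's isqrt_bs(m) with its initial bracket lo = 0, hi = m + 1
def isqrtBs (m : Int) : Int := isqrtGo (m + 1).toNat m 0 (m + 1)

-- the inner 'for j in range(i + 1)' loop of Source B's func
def altInner (n i : Int) : List (Int × Int × Int) :=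
  (PySem.List.pyRange 0 (i + 1) 1).foldl (fun acc j =>
    let rem := n - i * i - j * j
    if rem ≥ 0 then
      let k := isqrtBs rem
      if k ≤ j ∧ k * k = rem then acc ++ [(i, j, k)] else acc
    else acc) []

-- the outer 'while i * i <= n' loop of Source B's func; fuel = n + 2 bounds the
-- iterations (i*i <= n forces i <= n), making the recursion structural
def altGo : Nat → Int → Int → List (Int × Int × Int) → List (Int × Int × Int)
  | 0, _, _, acc => acc
  | fuel + 1, n, i, acc =>
    if i * i ≤ n then altGo fuel n (i + 1) (acc ++ altInner n i) else acc

def func_alt (n : Int) : List (Int × Int × Int) := altGo (n + 2).toNat n 0 []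

-- ===== PRECONDITION & SPEC =====
-- For n = 0 and n = 1, A's 'range(n)' bound excludes the valid triples (0,0,0) resp. (1,0,0),
-- so A returns [] there while B returns that triple; B's value is the intended answer since
-- i*i + j*j + k*k = n holds with i >= j >= k.
def D_func (n : Int) : Prop := n = 0 ∨ n = 1
instance (n : Int) : Decidable (D_func n) := by unfold D_func; infer_instance
def Spec_func (n : Int) (out : List (Int × Int × Int)) : Prop := ¬ D_func n → out = func_alt n
instance (n : Int) (out : List (Int × Int × Int)) : Decidable (Spec_func n out) := by unfold Spec_func; infer_instance
def pvDiffWitness_func : Int := 0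
def pvDiffWitnessOut_func : (List (Int × Int × Int)) × (List (Int × Int × Int)) := ([], [(0, 0, 0)])

-- ===== CLAIM (what is proved, stated in full; the proofs are below) =====
def Claim_unchanged_func : Prop := ∀ (n : Int), Dom_func n → Spec_func n (func n)
def Claim_changed_func : Prop := Dom_func (pvDiffWitness_func) ∧ D_func (pvDiffWitness_func) ∧ func (pvDiffWitness_func) = pvDiffWitnessOut_func.1 ∧ func_alt (pvDiffWitness_func) = pvDiffWitnessOut_func.2 ∧ pvDiffWitnessOut_func.1 ≠ pvDiffWitnessOut_func.2
def Claim_exact_func : Prop := ∀ (n : Int), Dom_func n → D_func n → func n ≠ func_alt n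

-- ===== LEMMAS AND PROOFS =====

-- binary-search invariant: from a bracket lo*lo ≤ m < hi*hi the loop returns the floor sqrt
theorem isqrtGo_spec (m : Int) : ∀ (fuel : Nat) (lo hi : Int), (hi - lo).toNat ≤ fuel →
    0 ≤ lo → lo * lo ≤ m → m < hi * hi → lo < hi →
    0 ≤ isqrtGo fuel m lo hi ∧ isqrtGo fuel m lo hi * isqrtGo fuel m lo hi ≤ m ∧
      m < (isqrtGo fuel m lo hi + 1) * (isqrtGo fuel m lo hi + 1) := by
  intro fuel
  induction fuel with
  | zero =>
    intro lo hi hf h0 h1 h2 h3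
    omega
  | succ fuel ih =>
    intro lo hi hf h0 h1 h2 h3
    rw [isqrtGo]
    by_cases hgt : hi - lo > 1
    · simp only [hgt, if_true]
      have hmid : PySem.Int.floordiv (lo + hi) 2 = (lo + hi) / 2 :=
        PySem.Int.floordiv_eq_ediv_of_pos (by norm_num)
      rw [hmid]
      set mid := (lo + hi) / 2 with hmiddef
      have hb1 : lo < mid := by omega
      have hb2 : mid < hi := by omega
      by_cases hc : mid * mid ≤ m
      · simp only [hc, if_true]
        exact ih mid hi (by omega) (by omega) hc h2 hb2
      · simp only [hc, if_false]
        exact ih lo mid (by omega) h0 h1 (by omega) hb1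
    · simp only [hgt, if_false]
      have hhi : hi = lo + 1 := by omega
      subst hhi
      exact ⟨h0, h1, h2⟩

theorem isqrtBs_spec (m : Int) (hm : 0 ≤ m) :
    0 ≤ isqrtBs m ∧ isqrtBs m * isqrtBs m ≤ m ∧ m < (isqrtBs m + 1) * (isqrtBs m + 1) := by
  have := isqrtGo_spec m (m + 1).toNat 0 (m + 1) (by omega) le_rfl (by nlinarith) (by nlinarith)
    (by omega)
  simpa [isqrtBs] using this

-- if k*k = m with 0 ≤ k then the binary search returns exactly k
theorem isqrtBs_eq_of_sq {m k : Int} (hk : 0 ≤ k) (h : k * k = m) : isqrtBs m = k := by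
  have hm : 0 ≤ m := h ▸ mul_nonneg hk hk
  obtain ⟨hr0, hr1, hr2⟩ := isqrtBs_spec m hm
  nlinarith [sq_nonneg (isqrtBs m - k), sq_nonneg (isqrtBs m + k)]

-- a filter keeping exactly one element of a duplicate-free list
theorem pv_filter_singleton {l : List Int} {p : Int → Bool} {a : Int}
    (hnd : l.Nodup) (ha : a ∈ l) (hpa : p a = true) (huniq : ∀ b ∈ l, p b = true → b = a) :
    l.filter p = [a] := by
  induction l with
  | nil => cases ha
  | cons h t ih =>
    rcases List.nodup_cons.mp hnd with ⟨hht, hndt⟩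
    by_cases hph : p h = true
    · have hha : h = a := huniq h List.mem_cons_self hph
      subst hha
      have ht : t.filter p = [] := by
        rw [List.filter_eq_nil_iff]
        intro b hb hpb
        exact hht (huniq b (List.mem_cons_of_mem _ hb) hpb ▸ hb)
      simp [hph, ht]
    · have hat : a ∈ t := by
        rcases List.mem_cons.mp ha with rfl | h'
        · exact absurd hpa hph
        · exact h'
      rw [List.filter_cons_of_neg (by simpa using hph)]
      exact ih hndt hat (fun b hb hpb => huniq b (List.mem_cons_of_mem _ hb) hpb)

-- A's three nested loops as a flatMap of filters
theorem funcA_eq (n : Int) :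
    func n = (PySem.List.pyRange 0 n 1).flatMap (fun i =>
      (PySem.List.pyRange 0 n 1).flatMap (fun j =>
        ((PySem.List.pyRange 0 n 1).filter
          (fun k => decide (i * i + j * j + k * k = n ∧ i ≥ j ∧ j ≥ k))).map (fun k => (i, j, k)))) := by
  have inner : ∀ (i j : Int) (a2 : List (Int × Int × Int)),
      (PySem.List.pyRange 0 n 1).foldl (fun a3 k =>
        if i * i + j * j + k * k = n ∧ i ≥ j ∧ j ≥ k then a3 ++ [(i, j, k)] else a3) a2
      = a2 ++ ((PySem.List.pyRange 0 n 1).filter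
          (fun k => decide (i * i + j * j + k * k = n ∧ i ≥ j ∧ j ≥ k))).map (fun k => (i, j, k)) := by
    intro i j a2
    rw [← PySem.List.foldl_append_if (fun k => decide (i * i + j * j + k * k = n ∧ i ≥ j ∧ j ≥ k))
      (fun k => (i, j, k)) (PySem.List.pyRange 0 n 1) a2]
    simp only [decide_eq_true_eq]
  have mid : ∀ (i : Int) (a1 : List (Int × Int × Int)),
      (PySem.List.pyRange 0 n 1).foldl (fun a2 j =>
        (PySem.List.pyRange 0 n 1).foldl (fun a3 k =>
          if i * i + j * j + k * k = n ∧ i ≥ j ∧ j ≥ k then a3 ++ [(i, j, k)] else a3) a2) a1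
      = a1 ++ (PySem.List.pyRange 0 n 1).flatMap (fun j =>
          ((PySem.List.pyRange 0 n 1).filter
            (fun k => decide (i * i + j * j + k * k = n ∧ i ≥ j ∧ j ≥ k))).map (fun k => (i, j, k))) := by
    intro i a1
    rw [PySem.List.foldl_congr_mem _ _ _ a1 (fun a2 j _ => inner i j a2)]
    exact PySem.List.foldl_append_eq_flatMap _ _ _
  rw [func, PySem.List.foldl_congr_mem _ _ _ [] (fun a1 i _ => mid i a1)]
  exact PySem.List.foldl_append_eq_flatMap _ _ _

-- B's inner loop as a flatMap of verified-isqrt singletons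
theorem altInner_eq (n i : Int) :
    altInner n i = (PySem.List.pyRange 0 (i + 1) 1).flatMap (fun j =>
      if n - i * i - j * j ≥ 0 ∧ isqrtBs (n - i * i - j * j) ≤ j ∧
          isqrtBs (n - i * i - j * j) * isqrtBs (n - i * i - j * j) = n - i * i - j * j
      then [(i, j, isqrtBs (n - i * i - j * j))] else []) := by
  rw [altInner, PySem.List.foldl_congr_mem _ _
    (fun acc j => acc ++ (if n - i * i - j * j ≥ 0 ∧ isqrtBs (n - i * i - j * j) ≤ j ∧
          isqrtBs (n - i * i - j * j) * isqrtBs (n - i * i - j * j) = n - i * i - j * j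
      then [(i, j, isqrtBs (n - i * i - j * j))] else [])) []
    (by
      intro acc j _
      dsimp only
      by_cases h1 : n - i * i - j * j ≥ 0
      · rw [if_pos h1]
        by_cases h2 : isqrtBs (n - i * i - j * j) ≤ j ∧
            isqrtBs (n - i * i - j * j) * isqrtBs (n - i * i - j * j) = n - i * i - j * j
        · rw [if_pos h2, if_pos ⟨h1, h2.1, h2.2⟩]
        · rw [if_neg h2, if_neg (fun hc => h2 ⟨hc.2.1, hc.2.2⟩)]
          simp
      · rw [if_neg h1, if_neg (fun hc => h1 hc.1)]
        simp)]
  exact PySem.List.foldl_append_eq_flatMap _ _ _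

-- B's outer loop unrolled into a flatMap over [i, isqrtBs n]
theorem altGo_eq (n : Int) (hn : 0 ≤ n) : ∀ (fuel : Nat) (i : Int) (acc : List (Int × Int × Int)),
    (n + 1 - i).toNat < fuel → 0 ≤ i →
    altGo fuel n i acc = acc ++ (PySem.List.pyRange i (isqrtBs n + 1) 1).flatMap (altInner n) := by
  obtain ⟨hs0, hs1, hs2⟩ := isqrtBs_spec n hn
  intro fuel
  induction fuel with
  | zero =>
    intro i acc hf hi0
    omega
  | succ fuel ih =>
    intro i acc hf hi0
    rw [altGo]
    by_cases hsq : i * i ≤ n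
    · simp only [hsq, if_true]
      have hile : i ≤ isqrtBs n := by nlinarith
      have hlt : i ≤ n := by nlinarith [sq_nonneg (i - 1)]
      have hrec := ih (i + 1) (acc ++ altInner n i) (by omega) (by omega)
      rw [hrec, PySem.List.pyRange_one_cons (show i < isqrtBs n + 1 by omega)]
      simp
    · simp only [hsq, if_false]
      have : isqrtBs n < i := by nlinarith
      rw [PySem.List.pyRange_one_eq_nil (by omega)]
      simp

-- per (i, j): A's inner k-filter is exactly B's verified-isqrt singleton
theorem pv_filt (n i j : Int) (h2 : 2 ≤ n) (hj0 : 0 ≤ j) (hji : j ≤ i) (hin : i < n) :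
    ((PySem.List.pyRange 0 n 1).filter
        (fun k => decide (i * i + j * j + k * k = n ∧ i ≥ j ∧ j ≥ k))).map (fun k => (i, j, k))
    = (if n - i * i - j * j ≥ 0 ∧ isqrtBs (n - i * i - j * j) ≤ j ∧
          isqrtBs (n - i * i - j * j) * isqrtBs (n - i * i - j * j) = n - i * i - j * j
       then [(i, j, isqrtBs (n - i * i - j * j))] else []) := by
  by_cases hc : n - i * i - j * j ≥ 0 ∧ isqrtBs (n - i * i - j * j) ≤ j ∧
      isqrtBs (n - i * i - j * j) * isqrtBs (n - i * i - j * j) = n - i * i - j * j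
  · obtain ⟨hrem, hsj, hssq⟩ := hc
    obtain ⟨hs0, -, -⟩ := isqrtBs_spec (n - i * i - j * j) hrem
    rw [if_pos ⟨hrem, hsj, hssq⟩, pv_filter_singleton (a := isqrtBs (n - i * i - j * j))
      (PySem.List.nodup_pyRange_one 0 n)
      (PySem.List.mem_pyRange_one.mpr ⟨hs0, by omega⟩)
      (by simp only [decide_eq_true_eq]; exact ⟨by linarith, hji, hsj⟩)
      (by
        intro b hb hpb
        simp only [decide_eq_true_eq] at hpb
        have hb0 : 0 ≤ b := (PySem.List.mem_pyRange_one.mp hb).1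
        have : b * b = n - i * i - j * j := by linarith [hpb.1]
        exact (isqrtBs_eq_of_sq hb0 this).symm)]
    rfl
  · rw [if_neg hc]
    have hnil : (PySem.List.pyRange 0 n 1).filter
        (fun k => decide (i * i + j * j + k * k = n ∧ i ≥ j ∧ j ≥ k)) = [] := by
      rw [List.filter_eq_nil_iff]
      intro k hk hpk
      simp only [decide_eq_true_eq] at hpk
      have hk0 : 0 ≤ k := (PySem.List.mem_pyRange_one.mp hk).1
      have hkk : k * k = n - i * i - j * j := by linarith [hpk.1]
      have hrem : n - i * i - j * j ≥ 0 := hkk ▸ mul_nonneg hk0 hk0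
      have hs := isqrtBs_eq_of_sq hk0 hkk
      exact hc ⟨hrem, hs ▸ hpk.2.2, by rw [hs]; exact hkk⟩
    rw [hnil]
    rfl

theorem pv_flatMap_congr {α β : Type} {l : List α} {f g : α → List β}
    (h : ∀ x ∈ l, f x = g x) : l.flatMap f = l.flatMap g := by
  induction l with
  | nil => rfl
  | cons x xs ih =>
    simp only [List.flatMap_cons, h x List.mem_cons_self,
      ih (fun y hy => h y (List.mem_cons_of_mem _ hy))]

-- drop a tail of a range all of whose elements contribute nothing to a flatMap
theorem pv_flatMap_trunc {β : Type} (g : Int → List β) (a m b : Int) (h1 : a ≤ m) (h2 : m ≤ b)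
    (hnil : ∀ x ∈ PySem.List.pyRange m b 1, g x = []) :
    (PySem.List.pyRange a b 1).flatMap g = (PySem.List.pyRange a m 1).flatMap g := by
  rw [PySem.List.pyRange_one_append a m b h1 h2, List.flatMap_append,
    List.flatMap_eq_nil_iff.mpr hnil, List.append_nil]

-- the main equality, for n ≥ 2
theorem main_eq (n : Int) (h2 : 2 ≤ n) : func n = func_alt n := by
  obtain ⟨hs0, hs1, hs2⟩ := isqrtBs_spec n (by omega)
  have hsn : isqrtBs n < n := by nlinarith
  rw [funcA_eq, func_alt, altGo_eq n (by omega) (n + 2).toNat 0 [] (by omega) le_rfl,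
    List.nil_append]
  rw [pv_flatMap_trunc _ 0 (isqrtBs n + 1) n (by omega) (by omega)
    (by
      intro i hi
      rw [List.flatMap_eq_nil_iff]
      intro j hj
      have hnil : (PySem.List.pyRange 0 n 1).filter
          (fun k => decide (i * i + j * j + k * k = n ∧ i ≥ j ∧ j ≥ k)) = [] := by
        rw [List.filter_eq_nil_iff]
        intro k hk hpk
        simp only [decide_eq_true_eq] at hpk
        have hi' : isqrtBs n + 1 ≤ i := (PySem.List.mem_pyRange_one.mp hi).1
        have hj0 : 0 ≤ j := (PySem.List.mem_pyRange_one.mp hj).1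
        have hk0 : 0 ≤ k := (PySem.List.mem_pyRange_one.mp hk).1
        nlinarith [hpk.1, mul_nonneg hj0 hj0, mul_nonneg hk0 hk0]
      rw [hnil]
      rfl)]
  apply pv_flatMap_congr
  intro i hi
  obtain ⟨hi0, hile⟩ := PySem.List.mem_pyRange_one.mp hi
  have hin : i < n := by omega
  rw [altInner_eq]
  rw [pv_flatMap_trunc _ 0 (i + 1) n (by omega) (by omega)
    (by
      intro j hj
      have hji : i + 1 ≤ j := (PySem.List.mem_pyRange_one.mp hj).1
      have hnil : (PySem.List.pyRange 0 n 1).filter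
          (fun k => decide (i * i + j * j + k * k = n ∧ i ≥ j ∧ j ≥ k)) = [] := by
        rw [List.filter_eq_nil_iff]
        intro k hk hpk
        simp only [decide_eq_true_eq] at hpk
        omega
      rw [hnil]
      rfl)]
  apply pv_flatMap_congr
  intro j hj
  obtain ⟨hj0, hjlt⟩ := PySem.List.mem_pyRange_one.mp hj
  exact pv_filt n i j h2 hj0 (by omega) hin

theorem pv_alt0 : func_alt 0 = [(0, 0, 0)] := by decide

theorem pv_alt1 : func_alt 1 = [(1, 0, 0)] := by decide

theorem pv_neg (n : Int) (hneg : n < 0) : func n = func_alt n := by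
  have hA : func n = [] := by
    rw [func, PySem.List.pyRange_one_eq_nil (by omega)]
    rfl
  have hB : func_alt n = [] := by
    rw [func_alt]
    cases h : (n + 2).toNat with
    | zero => rfl
    | succ fuel =>
      rw [altGo, if_neg (by nlinarith [sq_nonneg (0 : Int)])]
  rw [hA, hB]

-- ===== VERDICT (by name: the statement is the Claim_ definition above) =====
theorem func_spec : Claim_unchanged_func := by
  intro n _ hD
  rcases Int.lt_or_le n 2 with hlt | hge
  · have hneg : n < 0 := by
      rcases Decidable.em (n = 0) with h | h
      · exact absurd (Or.inl h) hD
      · rcases Decidable.em (n = 1) with h1 | h1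
        · exact absurd (Or.inr h1) hD
        · omega
    exact pv_neg n hneg
  · exact main_eq n hge

theorem func_changed : Claim_changed_func := by
  unfold Claim_changed_func
  refine ⟨by decide, by decide, by decide, ?_, by decide⟩
  exact pv_alt0

theorem func_tight : Claim_exact_func := by
  intro n _ hD
  rcases hD with h | h <;> subst h
  · rw [show func 0 = [] from by decide, pv_alt0]
    simp
  · rw [show func 1 = [] from by decide, pv_alt1]
    simp
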